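-- pv_equiv track=rewrite | github.com/dongsik93/HomeStudy | etc/1-1.py | solution
-- ===== SOURCE A (Python) =====
-- def solution(n):
--     answer = 0
--
--     a = [False, False] + [True]*(n-1)
--     primes = []
--
--     for i in range(2,n+1):
--         if(a[i]):
--             primes.append(i)
--             for j in range(2*i, n+1, i):
--                 a[j] = False
--
--     for i in range(2**len(primes)):
--         ss = []
--         for j in range(len(primes)):
--             if(i & (1 << j) != 0):
--                 ss.append(primes[j])
--         if(sum(ss) == n and len(ss)==3):
--             answer += 1
--     return answer
-- ===== SOURCE B (Python) =====
-- def _sieve(n):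
--     a = [False, False] + [True] * (n - 1)
--     primes = []
--     for i in range(2, n + 1):
--         if a[i]:
--             primes.append(i)
--             for j in range(2 * i, n + 1, i):
--                 a[j] = False
--     return primes
--
--
-- def _choose(primes, k, target):
--     # number of ways to pick k elements (in order) from primes summing to target
--     if k == 0:
--         return 1 if target == 0 else 0
--     if not primes:
--         return 0
--     return _choose(primes[1:], k - 1, target - primes[0]) + _choose(primes[1:], k, target)
--
--
-- def solution(n):
--     return _choose(_sieve(n), 3, n)
-- ===== Notes on version B (the rewrite author's own statement) =====
-- stated objective: faster
-- what changed: Replaces the 2^p bitmask enumeration of all subsets of the prime list by a recursive choose-k combination count (take/skip the head, k capped at 3), keeping the same sieve helper; intended as asymptotically faster (measured 4.5x at the largest size where A still finishes; A times out beyond while B keeps returning).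
import Mathlib
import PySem

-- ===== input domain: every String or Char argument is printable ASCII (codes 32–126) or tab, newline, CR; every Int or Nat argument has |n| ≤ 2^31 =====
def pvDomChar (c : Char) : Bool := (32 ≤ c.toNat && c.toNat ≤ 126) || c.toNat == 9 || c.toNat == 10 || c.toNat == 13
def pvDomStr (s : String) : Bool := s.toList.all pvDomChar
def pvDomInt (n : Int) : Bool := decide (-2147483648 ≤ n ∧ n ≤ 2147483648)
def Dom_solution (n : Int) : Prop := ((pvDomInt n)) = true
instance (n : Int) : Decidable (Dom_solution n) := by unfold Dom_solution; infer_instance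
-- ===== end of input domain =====

-- B replaces A's 2^p bitmask enumeration of all subsets of the prime list by a recursive
-- choose-k combination count (take/skip the head, k capped at 3); the sieve helper is the same
-- code in both sources, so its port is a single shared definition.

-- ===== PORT A =====

-- shared sieve of Eratosthenes (identical code in Source A's `solution` and Source B's `_sieve`)
def sievePrimes (n : Int) : List Int :=
  let a0 : List Bool := [false, false] ++ List.replicate (n - 1).toNat true
  ((PySem.List.pyRange 2 (n + 1) 1).foldl
    (fun st i =>
      if (PySem.List.pyGet? st.1 i).getD false then   -- a[i]; always in range when the loop body runs
        ((PySem.List.pyRange (2 * i) (n + 1) i).foldl (fun a j => a.set j.toNat false) st.1,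
         st.2 ++ [i])
      else st)
    (a0, [])).2

-- inner loop of A: ss = the primes[j] with bit j of i set (indices j are nonneg, ported over Nat)
def subsetOf (i : Nat) (xs : List Int) : List Int :=
  (List.range xs.length).foldl
    (fun ss j => if i &&& (1 <<< j) ≠ 0 then ss ++ [xs.getD j 0] else ss) []

-- range(2**len(primes)) runs over nonnegative ints; ported as List.range over Nat (same values)
def solution (n : Int) : Int :=
  let primes := sievePrimes n
  (List.range (2 ^ primes.length)).foldl
    (fun answer i =>
      let ss := subsetOf i primes
      if ss.sum = n ∧ ss.length = 3 then answer + 1 else answer) 0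

-- ===== PORT B =====

-- Source B's _choose: number of ways to pick k elements (in order) from the list summing to target
def choose3 : List Int → Nat → Int → Int
  | _, 0, target => if target = 0 then 1 else 0
  | [], _ + 1, _ => 0
  | p :: rest, k + 1, target => choose3 rest k (target - p) + choose3 rest (k + 1) target

def solution_alt (n : Int) : Int :=
  choose3 (sievePrimes n) 3 n

-- ===== PRECONDITION & SPEC =====
def Spec_solution (n : Int) (out : Int) : Prop := out = solution_alt n
instance (n : Int) (out : Int) : Decidable (Spec_solution n out) := by unfold Spec_solution; infer_instance

-- ===== CLAIM (what is proved, stated in full; the proofs are below) =====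
def Claim_equal_solution : Prop := ∀ (n : Int), Dom_solution n → Spec_solution n (solution n)

-- ===== LEMMAS AND PROOFS =====

theorem bitcond (i j : Nat) : (i &&& (1 <<< j) ≠ 0) ↔ i.testBit j := by
  rw [Nat.shiftLeft_eq, one_mul, Nat.and_two_pow]
  rcases h : i.testBit j <;> simp

theorem subsetOf_nil (i : Nat) : subsetOf i [] = [] := by
  simp [subsetOf]

theorem subsetOf_repr (i : Nat) (xs : List Int) :
    subsetOf i xs =
      ((List.range xs.length).filter (fun j => decide (i &&& (1 <<< j) ≠ 0))).map
        (fun j => xs.getD j 0) := by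
  simpa [subsetOf] using PySem.List.foldl_append_ite (l := List.range xs.length)
    (p := fun j => i &&& (1 <<< j) ≠ 0) (f := fun j => xs.getD j 0) (acc := [])

theorem subsetOf_cons (i : Nat) (x : Int) (xs : List Int) :
    subsetOf i (x :: xs) =
      (if i.testBit 0 then [x] else []) ++ subsetOf (i / 2) xs := by
  rw [subsetOf_repr, subsetOf_repr]
  rw [List.length_cons, List.range_succ_eq_map]
  rw [List.filter_cons]
  have hsucc : ∀ j : Nat, (decide (i &&& (1 <<< (j+1)) ≠ 0)) = decide ((i/2) &&& (1 <<< j) ≠ 0) := by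
    intro j
    simp only [bitcond, Nat.testBit_add_one]
  have hfilter :
      List.filter ((fun j => !decide (i &&& 1 <<< j = 0)) ∘ Nat.succ) (List.range xs.length)
        = List.filter (fun j => !decide (i / 2 &&& 1 <<< j = 0)) (List.range xs.length) := by
    apply List.filter_congr
    intro j _
    simpa using hsucc j
  rcases hb : i.testBit 0 <;> simp [Nat.testBit_zero] at hb <;>
    simp [hb, List.filter_map, hfilter, List.map_map, Function.comp]

theorem range_two_mul_flatMap (K : Nat) :
    (List.range K).flatMap (fun m => [2 * m, 2 * m + 1]) = List.range (2 * K) := by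
  induction K with
  | zero => simp
  | succ k ih =>
    rw [List.range_succ, List.flatMap_append, ih]
    have : 2 * (k + 1) = (2 * k + 1) + 1 := by ring
    rw [this, List.range_succ, List.range_succ]
    simp

theorem countP_pair (L : List Nat) (p : Nat → Bool) :
    (L.flatMap fun m => [2 * m, 2 * m + 1]).countP p
      = L.countP (fun m => p (2 * m)) + L.countP (fun m => p (2 * m + 1)) := by
  induction L with
  | nil => simp
  | cons a l ih =>
    simp [List.countP_cons, ih]
    rcases p (2*a) <;> rcases p (2*a+1) <;> simp <;> omega

theorem choose3_zero (xs : List Int) (t : Int) : choose3 xs 0 t = if t = 0 then 1 else 0 := by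
  cases xs <;> rfl

theorem mask_eq_choose (xs : List Int) (k : Nat) (t : Int) :
    (((List.range (2 ^ xs.length)).countP
        (fun i => decide ((subsetOf i xs).sum = t ∧ (subsetOf i xs).length = k)) : Nat) : Int)
      = choose3 xs k t := by
  induction xs generalizing k t with
  | nil =>
    have : (2 : Nat) ^ ([] : List Int).length = 1 := by simp
    rw [this, List.range_one]
    rcases k with _ | k'
    · rw [choose3_zero]
      split_ifs with h <;> simp [subsetOf_nil, List.countP, List.countP.go, h, eq_comm]
    · simp [choose3, subsetOf_nil, List.countP, List.countP.go]
  | cons x xs ih =>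
    have hlen : (2 : Nat) ^ (x :: xs).length = 2 * 2 ^ xs.length := by
      simp [List.length_cons, pow_succ]; ring
    rw [hlen, ← range_two_mul_flatMap, countP_pair]
    have heven : ∀ m : Nat,
        (decide ((subsetOf (2*m) (x::xs)).sum = t ∧ (subsetOf (2*m) (x::xs)).length = k))
          = (decide ((subsetOf m xs).sum = t ∧ (subsetOf m xs).length = k)) := by
      intro m
      have : subsetOf (2*m) (x::xs) = subsetOf m xs := by
        rw [subsetOf_cons]
        simp
      rw [this]
    have hodd : ∀ m : Nat, subsetOf (2*m+1) (x::xs) = x :: subsetOf m xs := by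
      intro m
      rw [subsetOf_cons]
      have h2 : (2*m+1)/2 = m := by omega
      simp [h2, Nat.testBit_zero]
    rcases k with _ | k'
    · -- k = 0 : the odd masks (subsets containing x) never have length 0
      have hz : (List.range (2 ^ xs.length)).countP
          (fun m => decide ((subsetOf (2*m+1) (x::xs)).sum = t ∧ (subsetOf (2*m+1) (x::xs)).length = 0)) = 0 := by
        apply List.countP_eq_zero.mpr
        intro m _
        simp [hodd m]
      simp only [heven, hz, Nat.add_zero]
      rw [ih 0 t, choose3_zero, choose3_zero]
    · have hsplit : ∀ m : Nat,
          (decide ((subsetOf (2*m+1) (x::xs)).sum = t ∧ (subsetOf (2*m+1) (x::xs)).length = k'+1))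
            = (decide ((subsetOf m xs).sum = t - x ∧ (subsetOf m xs).length = k')) := by
        intro m
        rw [hodd m]
        simp only [List.sum_cons, List.length_cons, decide_eq_decide]
        constructor <;> rintro ⟨h1, h2⟩ <;> constructor <;> omega
      simp only [heven, hsplit]
      push_cast
      rw [ih (k'+1) t, ih k' (t - x)]
      show _ = choose3 (x :: xs) (k'+1) t
      rw [choose3]
      ring

-- ===== VERDICT (by name: the statement is the Claim_ definition above) =====
theorem solution_spec : Claim_equal_solution := by
  intro n _
  show solution n = solution_alt n
  show (List.range (2 ^ (sievePrimes n).length)).foldl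
      (fun answer i =>
        let ss := subsetOf i (sievePrimes n)
        if ss.sum = n ∧ ss.length = 3 then answer + 1 else answer) 0
    = solution_alt n
  rw [PySem.List.foldl_ite_add_one]
  rw [mask_eq_choose (sievePrimes n) 3 n]
  simp [solution_alt]
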